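-- pv_equiv track=rewrite | github.com/smith-nathanh/ro-agent | ro_agent/eval/agentbench/evaluators/os_evaluator.py | _size_match
-- ===== SOURCE A (Python) =====
-- def _size_match(answer: str, expected: str) -> bool:
--     """Compare file sizes with unit conversion."""
--     units = {
--         "B": 1,
--         "Byte": 1,
--         "K": 1024,
--         "KB": 1024,
--         "M": 1024 * 1024,
--         "MB": 1024 * 1024,
--         "G": 1024 * 1024 * 1024,
--         "GB": 1024 * 1024 * 1024,
--         "T": 1024**4,
--         "TB": 1024**4,
--         "P": 1024**5,
--         "PB": 1024**5,
--     }
--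
--     def parse_size(s: str) -> int:
--         s = s.strip()
--         for unit, multiplier in sorted(units.items(), key=lambda x: -len(x[0])):
--             if s.endswith(unit):
--                 try:
--                     return int(s[: -len(unit)]) * multiplier
--                 except ValueError:
--                     return -1
--         try:
--             return int(s)
--         except ValueError:
--             return -1
--
--     return parse_size(answer) == parse_size(expected)
-- ===== SOURCE B (Python) =====
-- def _size_match(answer: str, expected: str) -> bool:
--     """Compare file sizes with unit conversion."""
--     units = {
--         "B": 1,
--         "Byte": 1,
--         "K": 1024,
--         "KB": 1024,
--         "M": 1024 * 1024,
--         "MB": 1024 * 1024,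
--         "G": 1024 * 1024 * 1024,
--         "GB": 1024 * 1024 * 1024,
--         "T": 1024**4,
--         "TB": 1024**4,
--         "P": 1024**5,
--         "PB": 1024**5,
--     }
--
--     def parse_size(s: str) -> int:
--         # Units come in lengths 4 ("Byte"), 2 and 1 only, and at most one unit
--         # of each length can end the string, so three direct lookups replace
--         # the sort-and-scan over all units.
--         s = s.strip()
--         if s.endswith("Byte"):
--             cut, mult = 4, 1
--         else:
--             m2 = units.get(s[-2:])
--             if m2 is not None:
--                 cut, mult = 2, m2
--             else:
--                 m1 = units.get(s[-1:])
--                 if m1 is not None: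
--                     cut, mult = 1, m1
--                 else:
--                     try:
--                         return int(s)
--                     except ValueError:
--                         return -1
--         try:
--             return int(s[:-cut]) * mult
--         except ValueError:
--             return -1
--
--     return parse_size(answer) == parse_size(expected)
-- ===== Notes on version B (the rewrite author's own statement) =====
-- stated objective: alternative
-- what changed: parse_size no longer sorts units by length and scans all 12 with endswith per call: since units come only in lengths 4, 2 and 1, B does one endswith('Byte') check plus two O(1) dict lookups keyed by the fixed-length suffix slices s[-2:] and s[-1:].
import Mathlib
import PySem

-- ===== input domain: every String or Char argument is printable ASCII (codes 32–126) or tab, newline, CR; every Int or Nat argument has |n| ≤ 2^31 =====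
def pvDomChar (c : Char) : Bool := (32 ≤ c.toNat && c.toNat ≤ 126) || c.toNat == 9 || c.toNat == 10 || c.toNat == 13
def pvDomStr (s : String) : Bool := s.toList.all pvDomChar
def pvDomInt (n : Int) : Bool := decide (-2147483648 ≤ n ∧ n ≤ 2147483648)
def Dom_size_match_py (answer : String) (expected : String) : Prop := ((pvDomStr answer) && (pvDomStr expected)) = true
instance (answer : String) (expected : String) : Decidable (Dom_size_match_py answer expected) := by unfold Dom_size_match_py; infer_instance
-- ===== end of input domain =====

-- B replaces A's sort-and-scan over all 12 units by three direct fixed-length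
-- suffix lookups (units come only in lengths 4, 2 and 1); same return values.

-- ===== PORT A =====
-- the `units` dict of _size_match
def pvUnitsA : PySem.Dict String Int := PySem.Dict.ofList
  [("B", 1), ("Byte", 1), ("K", 1024), ("KB", 1024),
   ("M", 1024 * 1024), ("MB", 1024 * 1024),
   ("G", 1024 * 1024 * 1024), ("GB", 1024 * 1024 * 1024),
   ("T", 1024 ^ 4), ("TB", 1024 ^ 4), ("P", 1024 ^ 5), ("PB", 1024 ^ 5)]

-- the for-loop of parse_size: first (unit, multiplier) with s.endswith(unit) wins,
-- falling through to int(s); int() raising ValueError yields -1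
def pvParseLoopA (s : String) : List (String × Int) → Int
  | [] =>
    match PySem.Int.ofStr? s with
    | some n => n
    | none => -1
  | (u, m) :: rest =>
    if PySem.Str.endswith s u then
      match PySem.Int.ofStr? (PySem.Str.slice s none (some (-(PySem.Str.len u)))) with
      | some n => n * m
      | none => -1
    else pvParseLoopA s rest

def pvParseSizeA (s : String) : Int :=
  pvParseLoopA (PySem.Str.strip s)
    (PySem.List.sorted pvUnitsA.items (fun x => -(PySem.Str.len x.1)) false)

def size_match_py (answer : String) (expected : String) : Bool :=
  pvParseSizeA answer == pvParseSizeA expected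

-- ===== PORT B =====
def pvUnitsB : PySem.Dict String Int := PySem.Dict.ofList
  [("B", 1), ("Byte", 1), ("K", 1024), ("KB", 1024),
   ("M", 1024 * 1024), ("MB", 1024 * 1024),
   ("G", 1024 * 1024 * 1024), ("GB", 1024 * 1024 * 1024),
   ("T", 1024 ^ 4), ("TB", 1024 ^ 4), ("P", 1024 ^ 5), ("PB", 1024 ^ 5)]

-- parse_size of B: endswith("Byte"), else units.get(s[-2:]), else units.get(s[-1:]);
-- a hit fixes (cut, mult) and the shared tail returns int(s[:-cut]) * mult, else int(s)
def pvParseSizeB (s0 : String) : Int :=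
  let s := PySem.Str.strip s0
  match (if PySem.Str.endswith s "Byte" then some ((4 : Int), (1 : Int))
         else
           match pvUnitsB.get? (PySem.Str.slice s (some (-2)) none) with
           | some m2 => some ((2 : Int), m2)
           | none =>
             match pvUnitsB.get? (PySem.Str.slice s (some (-1)) none) with
             | some m1 => some ((1 : Int), m1)
             | none => none) with
  | some (cut, mult) =>
    (match PySem.Int.ofStr? (PySem.Str.slice s none (some (-cut))) with
     | some n => n * mult
     | none => -1)
  | none =>
    (match PySem.Int.ofStr? s with
     | some n => n
     | none => -1)

def size_match_py_alt (answer : String) (expected : String) : Bool :=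
  pvParseSizeB answer == pvParseSizeB expected

-- ===== PRECONDITION & SPEC =====
def Spec_size_match_py (answer : String) (expected : String) (out : Bool) : Prop := out = size_match_py_alt answer expected
instance (answer : String) (expected : String) (out : Bool) : Decidable (Spec_size_match_py answer expected out) := by unfold Spec_size_match_py; infer_instance

-- ===== CLAIM (what is proved, stated in full; the proofs are below) =====
def Claim_equal_size_match_py : Prop := ∀ (answer : String) (expected : String), Dom_size_match_py answer expected → Spec_size_match_py answer expected (size_match_py answer expected)

-- ===== LEMMAS AND PROOFS =====

-- A's sorted(units.items(), key=lambda x: -len(x[0])) computed once and for all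
def pvU12 : List (String × Int) :=
  [("Byte", 1), ("KB", 1024), ("MB", 1048576), ("GB", 1073741824),
   ("TB", 1099511627776), ("PB", 1125899906842624),
   ("B", 1), ("K", 1024), ("M", 1048576), ("G", 1073741824),
   ("T", 1099511627776), ("P", 1125899906842624)]

lemma pvSortedUnits :
    PySem.List.sorted pvUnitsA.items (fun x => -(PySem.Str.len x.1)) false = pvU12 := by
  decide

-- s.endswith(p) for nonempty p is: the length-|p| tail slice equals p
lemma pvEndsIff (t p : String) (k : Int) (hk : PySem.Str.len p = k) (h0 : 0 < k) :
    PySem.Str.endswith t p = true ↔ PySem.Str.slice t (some (-k)) none = p := by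
  subst hk
  unfold PySem.Str.len at *
  rw [← String.toList_inj, PySem.Str.toList_slice, PySem.Chars.slice_eq_listSlice]
  rw [PySem.Str.endswith, PySem.Chars.endswith, List.isSuffixOf_iff_suffix]
  have h0' : 0 < p.toList.length := by exact_mod_cast h0
  rw [show (-(p.toList.length : Int)) = -((p.toList.length : Nat) : Int) by ring]
  rw [PySem.List.slice_from_neg_natCast _ _ h0']
  rw [List.suffix_iff_eq_drop]
  exact ⟨fun h => h.symm, fun h => h.symm⟩

lemma pvEndsTrue (t p : String) (k : Int) (hk : PySem.Str.len p = k) (h0 : 0 < k)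
    (h : PySem.Str.slice t (some (-k)) none = p) : PySem.Str.endswith t p = true :=
  (pvEndsIff t p k hk h0).2 h

lemma pvEndsFalse (t p : String) (k : Int) (hk : PySem.Str.len p = k) (h0 : 0 < k)
    (h : PySem.Str.slice t (some (-k)) none ≠ p) : PySem.Str.endswith t p = false := by
  cases he : PySem.Str.endswith t p
  · rfl
  · exact absurd ((pvEndsIff t p k hk h0).1 he) h

lemma pvUnitsB_eq : pvUnitsB = PySem.Dict.mk
  [("B", 1), ("Byte", 1), ("K", 1024), ("KB", 1024),
   ("M", 1048576), ("MB", 1048576),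
   ("G", 1073741824), ("GB", 1073741824),
   ("T", 1099511627776), ("TB", 1099511627776), ("P", 1125899906842624), ("PB", 1125899906842624)] := by decide

-- which keys units.get can hit, with their values
set_option maxHeartbeats 2000000 in
lemma pvGetB_cases (q : String) (m : Int) (h : pvUnitsB.get? q = some m) :
    (q = "B" ∧ m = 1) ∨ (q = "Byte" ∧ m = 1) ∨ (q = "K" ∧ m = 1024) ∨ (q = "KB" ∧ m = 1024) ∨
    (q = "M" ∧ m = 1048576) ∨ (q = "MB" ∧ m = 1048576) ∨
    (q = "G" ∧ m = 1073741824) ∨ (q = "GB" ∧ m = 1073741824) ∨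
    (q = "T" ∧ m = 1099511627776) ∨ (q = "TB" ∧ m = 1099511627776) ∨
    (q = "P" ∧ m = 1125899906842624) ∨ (q = "PB" ∧ m = 1125899906842624) := by
  rw [pvUnitsB_eq] at h
  simp only [PySem.Dict.get?_mk_cons, beq_iff_eq] at h
  split_ifs at h with h1 h2 h3 h4 h5 h6 h7 h8 h9 h10 h11 h12 <;>
    first | simp_all | simp [PySem.Dict.get?] at h

-- endswith u for a 2-char unit u is impossible once units.get(s[-2:]) missed
lemma pvEndsFalse2 (t p : String) (hk : PySem.Str.len p = 2)
    (hp : (pvUnitsB.get? p).isSome)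
    (h2 : pvUnitsB.get? (PySem.Str.slice t (some (-2)) none) = none) :
    PySem.Str.endswith t p = false := by
  refine pvEndsFalse t p 2 hk (by norm_num) (fun h => ?_)
  rw [h] at h2; rw [h2] at hp; simp at hp

-- what the python slices s[-2:] and s[-1:] are as lists
lemma pvSlice2 (t : String) :
    (PySem.Str.slice t (some (-2)) none).toList = t.toList.drop (t.toList.length - 2) := by
  rw [PySem.Str.toList_slice, PySem.Chars.slice_eq_listSlice, PySem.List.slice_some_none]
  rw [PySem.List.clampIdx_neg_ofNat _ _ (by norm_num)]

lemma pvSlice1 (t : String) :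
    (PySem.Str.slice t (some (-1)) none).toList = t.toList.drop (t.toList.length - 1) := by
  rw [PySem.Str.toList_slice, PySem.Chars.slice_eq_listSlice, PySem.List.slice_some_none]
  rw [PySem.List.clampIdx_neg_one]

-- s[-2:] cannot be a 4-character string
lemma pvSlice2_ne_Byte (t : String) : PySem.Str.slice t (some (-2)) none ≠ "Byte" := by
  intro h
  have := congrArg (fun s => s.toList.length) h
  simp only [pvSlice2, List.length_drop] at this
  simp at this; omega

-- s[-1:] cannot be a 2- or 4-character string
lemma pvSlice1_len (t : String) (p : String) (h : PySem.Str.slice t (some (-1)) none = p) :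
    p.toList.length ≤ 1 := by
  have := congrArg (fun s => s.toList.length) h
  simp only [pvSlice1, List.length_drop] at this
  omega

-- if s[-2:] is a single character then s is that one-character string
lemma pvSlice2_single (t : String) (p : String) (hp : p.toList.length = 1)
    (h : PySem.Str.slice t (some (-2)) none = p) : t = p := by
  have hl := congrArg String.toList h
  rw [pvSlice2] at hl
  have hlen := congrArg List.length hl
  simp only [List.length_drop, hp] at hlen
  have h1 : t.toList.length = 1 := by omega
  rw [← String.toList_inj, ← hl, h1]
  rfl

-- the core: on any (stripped) string both parse_size bodies agree
lemma pvCore (t : String) :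
    pvParseLoopA t pvU12 =
      (match (if PySem.Str.endswith t "Byte" then some ((4 : Int), (1 : Int))
              else
                match pvUnitsB.get? (PySem.Str.slice t (some (-2)) none) with
                | some m2 => some ((2 : Int), m2)
                | none =>
                  match pvUnitsB.get? (PySem.Str.slice t (some (-1)) none) with
                  | some m1 => some ((1 : Int), m1)
                  | none => none) with
       | some (cut, mult) =>
         (match PySem.Int.ofStr? (PySem.Str.slice t none (some (-cut))) with
          | some n => n * mult
          | none => -1)
       | none =>
         (match PySem.Int.ofStr? t with
          | some n => n
          | none => -1)) := by
  by_cases hB : PySem.Str.endswith t "Byte" = true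
  · simp only [pvU12, pvParseLoopA, hB, if_true]
    rw [show PySem.Str.len "Byte" = (4 : Int) from by decide]
  · have hBf : PySem.Str.endswith t "Byte" = false := by simpa using hB
    cases h2 : pvUnitsB.get? (PySem.Str.slice t (some (-2)) none) with
    | some m =>
      rcases pvGetB_cases _ _ h2 with ⟨hq, hm⟩ | ⟨hq, hm⟩ | ⟨hq, hm⟩ | ⟨hq, hm⟩ | ⟨hq, hm⟩ |
        ⟨hq, hm⟩ | ⟨hq, hm⟩ | ⟨hq, hm⟩ | ⟨hq, hm⟩ | ⟨hq, hm⟩ | ⟨hq, hm⟩ | ⟨hq, hm⟩ <;> subst hm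
      · -- q = "B" : t is the single character "B"
        rw [pvSlice2_single t _ (by decide) hq] at hBf h2 ⊢
        decide
      · exact absurd hq (pvSlice2_ne_Byte t)
      · rw [pvSlice2_single t _ (by decide) hq] at hBf h2 ⊢
        decide
      · -- s[-2:] = "KB"
        have e1 : PySem.Str.endswith t "KB" = true := pvEndsTrue t "KB" 2 (by decide) (by norm_num) hq
        simp only [pvU12, pvParseLoopA, hBf, e1, Bool.false_eq_true, if_false, if_true]
        rw [show PySem.Str.len "KB" = (2 : Int) from by decide]
      · rw [pvSlice2_single t _ (by decide) hq] at hBf h2 ⊢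
        decide
      · -- s[-2:] = "MB"
        have e1 : PySem.Str.endswith t "MB" = true := pvEndsTrue t "MB" 2 (by decide) (by norm_num) hq
        have f0 : PySem.Str.endswith t "KB" = false := pvEndsFalse t "KB" 2 (by decide) (by norm_num) (by rw [hq]; decide)
        simp only [pvU12, pvParseLoopA, hBf, e1, f0, Bool.false_eq_true, if_false, if_true]
        rw [show PySem.Str.len "MB" = (2 : Int) from by decide]
      · rw [pvSlice2_single t _ (by decide) hq] at hBf h2 ⊢
        decide
      · -- s[-2:] = "GB"
        have e1 : PySem.Str.endswith t "GB" = true := pvEndsTrue t "GB" 2 (by decide) (by norm_num) hq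
        have f0 : PySem.Str.endswith t "KB" = false := pvEndsFalse t "KB" 2 (by decide) (by norm_num) (by rw [hq]; decide)
        have f1 : PySem.Str.endswith t "MB" = false := pvEndsFalse t "MB" 2 (by decide) (by norm_num) (by rw [hq]; decide)
        simp only [pvU12, pvParseLoopA, hBf, e1, f0, f1, Bool.false_eq_true, if_false, if_true]
        rw [show PySem.Str.len "GB" = (2 : Int) from by decide]
      · rw [pvSlice2_single t _ (by decide) hq] at hBf h2 ⊢
        decide
      · -- s[-2:] = "TB"
        have e1 : PySem.Str.endswith t "TB" = true := pvEndsTrue t "TB" 2 (by decide) (by norm_num) hq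
        have f0 : PySem.Str.endswith t "KB" = false := pvEndsFalse t "KB" 2 (by decide) (by norm_num) (by rw [hq]; decide)
        have f1 : PySem.Str.endswith t "MB" = false := pvEndsFalse t "MB" 2 (by decide) (by norm_num) (by rw [hq]; decide)
        have f2 : PySem.Str.endswith t "GB" = false := pvEndsFalse t "GB" 2 (by decide) (by norm_num) (by rw [hq]; decide)
        simp only [pvU12, pvParseLoopA, hBf, e1, f0, f1, f2, Bool.false_eq_true, if_false, if_true]
        rw [show PySem.Str.len "TB" = (2 : Int) from by decide]
      · rw [pvSlice2_single t _ (by decide) hq] at hBf h2 ⊢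
        decide
      · -- s[-2:] = "PB"
        have e1 : PySem.Str.endswith t "PB" = true := pvEndsTrue t "PB" 2 (by decide) (by norm_num) hq
        have f0 : PySem.Str.endswith t "KB" = false := pvEndsFalse t "KB" 2 (by decide) (by norm_num) (by rw [hq]; decide)
        have f1 : PySem.Str.endswith t "MB" = false := pvEndsFalse t "MB" 2 (by decide) (by norm_num) (by rw [hq]; decide)
        have f2 : PySem.Str.endswith t "GB" = false := pvEndsFalse t "GB" 2 (by decide) (by norm_num) (by rw [hq]; decide)
        have f3 : PySem.Str.endswith t "TB" = false := pvEndsFalse t "TB" 2 (by decide) (by norm_num) (by rw [hq]; decide)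
        simp only [pvU12, pvParseLoopA, hBf, e1, f0, f1, f2, f3, Bool.false_eq_true, if_false, if_true]
        rw [show PySem.Str.len "PB" = (2 : Int) from by decide]
    | none =>
      cases h1 : pvUnitsB.get? (PySem.Str.slice t (some (-1)) none) with
      | some m =>
        rcases pvGetB_cases _ _ h1 with ⟨hq, hm⟩ | ⟨hq, hm⟩ | ⟨hq, hm⟩ | ⟨hq, hm⟩ | ⟨hq, hm⟩ |
          ⟨hq, hm⟩ | ⟨hq, hm⟩ | ⟨hq, hm⟩ | ⟨hq, hm⟩ | ⟨hq, hm⟩ | ⟨hq, hm⟩ | ⟨hq, hm⟩ <;> subst hm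
        · -- s[-1:] = "B"
          have g0 : PySem.Str.endswith t "KB" = false := pvEndsFalse2 t "KB" (by decide) (by decide) h2
          have g1 : PySem.Str.endswith t "MB" = false := pvEndsFalse2 t "MB" (by decide) (by decide) h2
          have g2 : PySem.Str.endswith t "GB" = false := pvEndsFalse2 t "GB" (by decide) (by decide) h2
          have g3 : PySem.Str.endswith t "TB" = false := pvEndsFalse2 t "TB" (by decide) (by decide) h2
          have g4 : PySem.Str.endswith t "PB" = false := pvEndsFalse2 t "PB" (by decide) (by decide) h2
          have e1 : PySem.Str.endswith t "B" = true := pvEndsTrue t "B" 1 (by decide) (by norm_num) hq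
          simp only [pvU12, pvParseLoopA, hBf, e1, g0, g1, g2, g3, g4, Bool.false_eq_true, if_false, if_true]
          rw [show PySem.Str.len "B" = (1 : Int) from by decide]
        · exact absurd (pvSlice1_len t _ hq) (by decide)
        · -- s[-1:] = "K"
          have g0 : PySem.Str.endswith t "KB" = false := pvEndsFalse2 t "KB" (by decide) (by decide) h2
          have g1 : PySem.Str.endswith t "MB" = false := pvEndsFalse2 t "MB" (by decide) (by decide) h2
          have g2 : PySem.Str.endswith t "GB" = false := pvEndsFalse2 t "GB" (by decide) (by decide) h2
          have g3 : PySem.Str.endswith t "TB" = false := pvEndsFalse2 t "TB" (by decide) (by decide) h2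
          have g4 : PySem.Str.endswith t "PB" = false := pvEndsFalse2 t "PB" (by decide) (by decide) h2
          have e1 : PySem.Str.endswith t "K" = true := pvEndsTrue t "K" 1 (by decide) (by norm_num) hq
          have f0 : PySem.Str.endswith t "B" = false := pvEndsFalse t "B" 1 (by decide) (by norm_num) (by rw [hq]; decide)
          simp only [pvU12, pvParseLoopA, hBf, e1, g0, g1, g2, g3, g4, f0, Bool.false_eq_true, if_false, if_true]
          rw [show PySem.Str.len "K" = (1 : Int) from by decide]
        · exact absurd (pvSlice1_len t _ hq) (by decide)
        · -- s[-1:] = "M"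
          have g0 : PySem.Str.endswith t "KB" = false := pvEndsFalse2 t "KB" (by decide) (by decide) h2
          have g1 : PySem.Str.endswith t "MB" = false := pvEndsFalse2 t "MB" (by decide) (by decide) h2
          have g2 : PySem.Str.endswith t "GB" = false := pvEndsFalse2 t "GB" (by decide) (by decide) h2
          have g3 : PySem.Str.endswith t "TB" = false := pvEndsFalse2 t "TB" (by decide) (by decide) h2
          have g4 : PySem.Str.endswith t "PB" = false := pvEndsFalse2 t "PB" (by decide) (by decide) h2
          have e1 : PySem.Str.endswith t "M" = true := pvEndsTrue t "M" 1 (by decide) (by norm_num) hq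
          have f0 : PySem.Str.endswith t "B" = false := pvEndsFalse t "B" 1 (by decide) (by norm_num) (by rw [hq]; decide)
          have f1 : PySem.Str.endswith t "K" = false := pvEndsFalse t "K" 1 (by decide) (by norm_num) (by rw [hq]; decide)
          simp only [pvU12, pvParseLoopA, hBf, e1, g0, g1, g2, g3, g4, f0, f1, Bool.false_eq_true, if_false, if_true]
          rw [show PySem.Str.len "M" = (1 : Int) from by decide]
        · exact absurd (pvSlice1_len t _ hq) (by decide)
        · -- s[-1:] = "G"
          have g0 : PySem.Str.endswith t "KB" = false := pvEndsFalse2 t "KB" (by decide) (by decide) h2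
          have g1 : PySem.Str.endswith t "MB" = false := pvEndsFalse2 t "MB" (by decide) (by decide) h2
          have g2 : PySem.Str.endswith t "GB" = false := pvEndsFalse2 t "GB" (by decide) (by decide) h2
          have g3 : PySem.Str.endswith t "TB" = false := pvEndsFalse2 t "TB" (by decide) (by decide) h2
          have g4 : PySem.Str.endswith t "PB" = false := pvEndsFalse2 t "PB" (by decide) (by decide) h2
          have e1 : PySem.Str.endswith t "G" = true := pvEndsTrue t "G" 1 (by decide) (by norm_num) hq
          have f0 : PySem.Str.endswith t "B" = false := pvEndsFalse t "B" 1 (by decide) (by norm_num) (by rw [hq]; decide)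
          have f1 : PySem.Str.endswith t "K" = false := pvEndsFalse t "K" 1 (by decide) (by norm_num) (by rw [hq]; decide)
          have f2 : PySem.Str.endswith t "M" = false := pvEndsFalse t "M" 1 (by decide) (by norm_num) (by rw [hq]; decide)
          simp only [pvU12, pvParseLoopA, hBf, e1, g0, g1, g2, g3, g4, f0, f1, f2, Bool.false_eq_true, if_false, if_true]
          rw [show PySem.Str.len "G" = (1 : Int) from by decide]
        · exact absurd (pvSlice1_len t _ hq) (by decide)
        · -- s[-1:] = "T"
          have g0 : PySem.Str.endswith t "KB" = false := pvEndsFalse2 t "KB" (by decide) (by decide) h2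
          have g1 : PySem.Str.endswith t "MB" = false := pvEndsFalse2 t "MB" (by decide) (by decide) h2
          have g2 : PySem.Str.endswith t "GB" = false := pvEndsFalse2 t "GB" (by decide) (by decide) h2
          have g3 : PySem.Str.endswith t "TB" = false := pvEndsFalse2 t "TB" (by decide) (by decide) h2
          have g4 : PySem.Str.endswith t "PB" = false := pvEndsFalse2 t "PB" (by decide) (by decide) h2
          have e1 : PySem.Str.endswith t "T" = true := pvEndsTrue t "T" 1 (by decide) (by norm_num) hq
          have f0 : PySem.Str.endswith t "B" = false := pvEndsFalse t "B" 1 (by decide) (by norm_num) (by rw [hq]; decide)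
          have f1 : PySem.Str.endswith t "K" = false := pvEndsFalse t "K" 1 (by decide) (by norm_num) (by rw [hq]; decide)
          have f2 : PySem.Str.endswith t "M" = false := pvEndsFalse t "M" 1 (by decide) (by norm_num) (by rw [hq]; decide)
          have f3 : PySem.Str.endswith t "G" = false := pvEndsFalse t "G" 1 (by decide) (by norm_num) (by rw [hq]; decide)
          simp only [pvU12, pvParseLoopA, hBf, e1, g0, g1, g2, g3, g4, f0, f1, f2, f3, Bool.false_eq_true, if_false, if_true]
          rw [show PySem.Str.len "T" = (1 : Int) from by decide]
        · exact absurd (pvSlice1_len t _ hq) (by decide)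
        · -- s[-1:] = "P"
          have g0 : PySem.Str.endswith t "KB" = false := pvEndsFalse2 t "KB" (by decide) (by decide) h2
          have g1 : PySem.Str.endswith t "MB" = false := pvEndsFalse2 t "MB" (by decide) (by decide) h2
          have g2 : PySem.Str.endswith t "GB" = false := pvEndsFalse2 t "GB" (by decide) (by decide) h2
          have g3 : PySem.Str.endswith t "TB" = false := pvEndsFalse2 t "TB" (by decide) (by decide) h2
          have g4 : PySem.Str.endswith t "PB" = false := pvEndsFalse2 t "PB" (by decide) (by decide) h2
          have e1 : PySem.Str.endswith t "P" = true := pvEndsTrue t "P" 1 (by decide) (by norm_num) hq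
          have f0 : PySem.Str.endswith t "B" = false := pvEndsFalse t "B" 1 (by decide) (by norm_num) (by rw [hq]; decide)
          have f1 : PySem.Str.endswith t "K" = false := pvEndsFalse t "K" 1 (by decide) (by norm_num) (by rw [hq]; decide)
          have f2 : PySem.Str.endswith t "M" = false := pvEndsFalse t "M" 1 (by decide) (by norm_num) (by rw [hq]; decide)
          have f3 : PySem.Str.endswith t "G" = false := pvEndsFalse t "G" 1 (by decide) (by norm_num) (by rw [hq]; decide)
          have f4 : PySem.Str.endswith t "T" = false := pvEndsFalse t "T" 1 (by decide) (by norm_num) (by rw [hq]; decide)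
          simp only [pvU12, pvParseLoopA, hBf, e1, g0, g1, g2, g3, g4, f0, f1, f2, f3, f4, Bool.false_eq_true, if_false, if_true]
          rw [show PySem.Str.len "P" = (1 : Int) from by decide]
        · exact absurd (pvSlice1_len t _ hq) (by decide)
      | none =>
        have g0 : PySem.Str.endswith t "KB" = false := pvEndsFalse2 t "KB" (by decide) (by decide) h2
        have g1 : PySem.Str.endswith t "MB" = false := pvEndsFalse2 t "MB" (by decide) (by decide) h2
        have g2 : PySem.Str.endswith t "GB" = false := pvEndsFalse2 t "GB" (by decide) (by decide) h2
        have g3 : PySem.Str.endswith t "TB" = false := pvEndsFalse2 t "TB" (by decide) (by decide) h2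
        have g4 : PySem.Str.endswith t "PB" = false := pvEndsFalse2 t "PB" (by decide) (by decide) h2
        have k0 : PySem.Str.endswith t "B" = false := pvEndsFalse t "B" 1 (by decide) (by norm_num) (by intro h; rw [h] at h1; revert h1; decide)
        have k1 : PySem.Str.endswith t "K" = false := pvEndsFalse t "K" 1 (by decide) (by norm_num) (by intro h; rw [h] at h1; revert h1; decide)
        have k2 : PySem.Str.endswith t "M" = false := pvEndsFalse t "M" 1 (by decide) (by norm_num) (by intro h; rw [h] at h1; revert h1; decide)
        have k3 : PySem.Str.endswith t "G" = false := pvEndsFalse t "G" 1 (by decide) (by norm_num) (by intro h; rw [h] at h1; revert h1; decide)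
        have k4 : PySem.Str.endswith t "T" = false := pvEndsFalse t "T" 1 (by decide) (by norm_num) (by intro h; rw [h] at h1; revert h1; decide)
        have k5 : PySem.Str.endswith t "P" = false := pvEndsFalse t "P" 1 (by decide) (by norm_num) (by intro h; rw [h] at h1; revert h1; decide)
        simp only [pvU12, pvParseLoopA, hBf, g0, g1, g2, g3, g4, k0, k1, k2, k3, k4, k5, Bool.false_eq_true, if_false]

lemma pvParse_eq (s : String) : pvParseSizeA s = pvParseSizeB s := by
  unfold pvParseSizeA pvParseSizeB
  rw [pvSortedUnits]
  exact pvCore (PySem.Str.strip s)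

-- ===== VERDICT (by name: the statement is the Claim_ definition above) =====
theorem size_match_py_spec : Claim_equal_size_match_py := by
  intro answer expected _
  unfold Spec_size_match_py size_match_py size_match_py_alt
  rw [pvParse_eq, pvParse_eq]
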